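-- pv_equiv track=rewrite | github.com/BoltNinja/Blocks | blocks1.py | find_block_placements
-- ===== SOURCE A (Python) =====
-- def find_block_placements(puzzle_height, puzzle_width, block_height, block_width):
--     placements = []
--     for i in range(puzzle_height - block_height + 1):
--         for j in range(puzzle_width - block_width + 1):
--             placement = []
--             for y in range(block_height):
--                 for x in range(block_width):
--                     index = (i + y) * puzzle_width + (j + x)
--                     placement.append(index)
--             placements.append(sorted(placement))
--     block_height, block_width = block_width, block_height
--     for i in range(puzzle_height - block_height + 1):
--         for j in range(puzzle_width - block_width + 1):
--             placement = []
--             for y in range(block_height):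
--                 for x in range(block_width):
--                     index = (i + y) * puzzle_width + (j + x)
--                     placement.append(index)
--             placements.append(sorted(placement))
--     return placements
-- ===== SOURCE B (Python) =====
-- def find_block_placements(puzzle_height, puzzle_width, block_height, block_width):
--     placements = []
--     for bh, bw in ((block_height, block_width), (block_width, block_height)):
--         if puzzle_height - bh + 1 <= 0 or puzzle_width - bw + 1 <= 0:
--             continue  # this orientation fits nowhere: skip building its template
--         offsets = sorted(y * puzzle_width + x for y in range(bh) for x in range(bw))
--         for i in range(puzzle_height - bh + 1):
--             for j in range(puzzle_width - bw + 1):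
--                 base = i * puzzle_width + j
--                 placements.append([base + off for off in offsets])
--     return placements
-- ===== Notes on version B (the rewrite author's own statement) =====
-- stated objective: alternative
-- what changed: B computes each orientation's cell-offset template once, sorts it once, and translates it by the top-left index per position, instead of rebuilding and re-sorting every cell index with four nested loops at every position.
import Mathlib
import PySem

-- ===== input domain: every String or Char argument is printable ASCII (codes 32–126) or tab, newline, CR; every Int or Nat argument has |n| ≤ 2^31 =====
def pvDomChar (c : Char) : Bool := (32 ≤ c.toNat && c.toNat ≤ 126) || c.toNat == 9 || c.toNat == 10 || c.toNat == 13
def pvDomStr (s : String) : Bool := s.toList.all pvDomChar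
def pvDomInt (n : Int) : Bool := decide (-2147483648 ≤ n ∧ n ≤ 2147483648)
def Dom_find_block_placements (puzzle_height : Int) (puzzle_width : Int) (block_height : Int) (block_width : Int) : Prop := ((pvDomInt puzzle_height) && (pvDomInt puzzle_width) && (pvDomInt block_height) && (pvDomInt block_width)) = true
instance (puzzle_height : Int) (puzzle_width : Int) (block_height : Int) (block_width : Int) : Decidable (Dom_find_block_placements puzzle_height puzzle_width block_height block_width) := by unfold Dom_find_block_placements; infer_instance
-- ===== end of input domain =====

-- B precomputes each orientation's sorted offset template once and translates it per top-left corner,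
-- instead of rebuilding and re-sorting every cell index from four nested loops per position (objective: alternative).

-- ===== PORT A =====
def find_block_placements (puzzle_height : Int) (puzzle_width : Int) (block_height : Int) (block_width : Int) : List (List Int) :=
  let placements : List (List Int) :=
    (PySem.List.pyRange 0 (puzzle_height - block_height + 1) 1).foldl (fun placements i =>
      (PySem.List.pyRange 0 (puzzle_width - block_width + 1) 1).foldl (fun placements j =>
        let placement : List Int :=
          (PySem.List.pyRange 0 block_height 1).foldl (fun placement y =>
            (PySem.List.pyRange 0 block_width 1).foldl (fun placement x =>
              placement ++ [(i + y) * puzzle_width + (j + x)]) placement) []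
        placements ++ [PySem.List.sorted placement (fun v => v) false]) placements) []
  -- block_height, block_width = block_width, block_height; then the same two loops again
  (PySem.List.pyRange 0 (puzzle_height - block_width + 1) 1).foldl (fun placements i =>
    (PySem.List.pyRange 0 (puzzle_width - block_height + 1) 1).foldl (fun placements j =>
      let placement : List Int :=
        (PySem.List.pyRange 0 block_width 1).foldl (fun placement y =>
          (PySem.List.pyRange 0 block_height 1).foldl (fun placement x =>
            placement ++ [(i + y) * puzzle_width + (j + x)]) placement) []
      placements ++ [PySem.List.sorted placement (fun v => v) false]) placements) placements

-- ===== PORT B =====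
-- one orientation of B: sorted offset template, then translate it over every valid corner
def fbpOrient (puzzle_height : Int) (puzzle_width : Int) (bh : Int) (bw : Int)
    (placements : List (List Int)) : List (List Int) :=
  if puzzle_height - bh + 1 ≤ 0 ∨ puzzle_width - bw + 1 ≤ 0 then placements else
  let offsets : List Int :=
    PySem.List.sorted
      ((PySem.List.pyRange 0 bh 1).flatMap (fun y =>
        (PySem.List.pyRange 0 bw 1).map (fun x => y * puzzle_width + x))) (fun v => v) false
  (PySem.List.pyRange 0 (puzzle_height - bh + 1) 1).foldl (fun placements i =>
    (PySem.List.pyRange 0 (puzzle_width - bw + 1) 1).foldl (fun placements j =>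
      let base := i * puzzle_width + j
      placements ++ [offsets.map (fun off => base + off)]) placements) placements

def find_block_placements_alt (puzzle_height : Int) (puzzle_width : Int) (block_height : Int) (block_width : Int) : List (List Int) :=
  [(block_height, block_width), (block_width, block_height)].foldl
    (fun placements p => fbpOrient puzzle_height puzzle_width p.1 p.2 placements) []

-- ===== PRECONDITION & SPEC =====
def Spec_find_block_placements (puzzle_height : Int) (puzzle_width : Int) (block_height : Int) (block_width : Int) (out : List (List Int)) : Prop := out = find_block_placements_alt puzzle_height puzzle_width block_height block_width
instance (puzzle_height : Int) (puzzle_width : Int) (block_height : Int) (block_width : Int) (out : List (List Int)) : Decidable (Spec_find_block_placements puzzle_height puzzle_width block_height block_width out) := by unfold Spec_find_block_placements; infer_instance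

-- ===== CLAIM (what is proved, stated in full; the proofs are below) =====
def Claim_equal_find_block_placements : Prop := ∀ (puzzle_height : Int) (puzzle_width : Int) (block_height : Int) (block_width : Int), Dom_find_block_placements puzzle_height puzzle_width block_height block_width → Spec_find_block_placements puzzle_height puzzle_width block_height block_width (find_block_placements puzzle_height puzzle_width block_height block_width)

-- ===== LEMMAS AND PROOFS =====

-- translating by a constant commutes with insertBy under <
theorem insertBy_map_add (c x : Int) (ys : List Int) :
    PySem.List.insertBy (fun a b => decide (a < b)) (c + x) (ys.map (fun v => c + v)) =
      (PySem.List.insertBy (fun a b => decide (a < b)) x ys).map (fun v => c + v) := by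
  induction ys with
  | nil => simp [PySem.List.insertBy]
  | cons y ys ih =>
    simp only [List.map_cons, PySem.List.insertBy]
    by_cases h : x < y
    · simp [h]
    · simp [h, ih]

-- translating by a constant commutes with Python's sorted (identity key)
theorem sorted_map_add (c : Int) (xs : List Int) :
    PySem.List.sorted (xs.map (fun v => c + v)) (fun v => v) false =
      (PySem.List.sorted xs (fun v => v) false).map (fun v => c + v) := by
  rw [PySem.List.sorted_eq_foldl_insertBy, PySem.List.sorted_eq_foldl_insertBy]
  suffices h : ∀ (acc : List Int),
      (xs.map (fun v => c + v)).foldl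
        (fun a x => PySem.List.insertBy (fun a b => decide (a < b)) x a) (acc.map (fun v => c + v)) =
      (xs.foldl (fun a x => PySem.List.insertBy (fun a b => decide (a < b)) x a) acc).map
        (fun v => c + v) by
    simpa using h []
  induction xs with
  | nil => intro acc; simp
  | cons x xs ih =>
    intro acc
    simp only [List.map_cons, List.foldl_cons]
    rw [insertBy_map_add, ih]

-- A's raw placement list at corner (i, j) is B's raw offset template translated by i*W+j
theorem placement_eq_template (pw bh bw i j : Int) :
    (PySem.List.pyRange 0 bh 1).foldl (fun placement y =>
        (PySem.List.pyRange 0 bw 1).foldl (fun placement x =>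
          placement ++ [(i + y) * pw + (j + x)]) placement) [] =
      ((PySem.List.pyRange 0 bh 1).flatMap (fun y =>
        (PySem.List.pyRange 0 bw 1).map (fun x => y * pw + x))).map (fun v => i * pw + j + v) := by
  have h1 : ∀ (y : Int) (pl : List Int),
      (PySem.List.pyRange 0 bw 1).foldl (fun placement x =>
        placement ++ [(i + y) * pw + (j + x)]) pl =
      pl ++ (PySem.List.pyRange 0 bw 1).map (fun x => (i + y) * pw + (j + x)) := by
    intro y pl
    exact PySem.List.foldl_append_singleton_eq_map _ _ _
  calc (PySem.List.pyRange 0 bh 1).foldl (fun placement y =>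
        (PySem.List.pyRange 0 bw 1).foldl (fun placement x =>
          placement ++ [(i + y) * pw + (j + x)]) placement) []
      = (PySem.List.pyRange 0 bh 1).foldl (fun placement y =>
          placement ++ (PySem.List.pyRange 0 bw 1).map (fun x => (i + y) * pw + (j + x))) [] := by
        exact PySem.List.foldl_congr_mem _ _ _ _ (fun pl y _ => h1 y pl)
    _ = (PySem.List.pyRange 0 bh 1).flatMap (fun y =>
          (PySem.List.pyRange 0 bw 1).map (fun x => (i + y) * pw + (j + x))) := by
        simpa using PySem.List.foldl_append_eq_flatMap
          (fun y => (PySem.List.pyRange 0 bw 1).map (fun x => (i + y) * pw + (j + x))) _ ([] : List Int)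
    _ = ((PySem.List.pyRange 0 bh 1).flatMap (fun y =>
          (PySem.List.pyRange 0 bw 1).map (fun x => y * pw + x))).map (fun v => i * pw + j + v) := by
        rw [List.map_flatMap]
        refine List.flatMap_congr (fun y _ => ?_)
        rw [List.map_map]
        refine List.map_congr_left (fun x _ => ?_)
        simp only [Function.comp]
        ring

-- one orientation of A equals fbpOrient with the same accumulator
theorem orient_eq (ph pw bh bw : Int) (acc : List (List Int)) :
    (PySem.List.pyRange 0 (ph - bh + 1) 1).foldl (fun placements i =>
      (PySem.List.pyRange 0 (pw - bw + 1) 1).foldl (fun placements j =>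
        placements ++ [PySem.List.sorted
          ((PySem.List.pyRange 0 bh 1).foldl (fun placement y =>
            (PySem.List.pyRange 0 bw 1).foldl (fun placement x =>
              placement ++ [(i + y) * pw + (j + x)]) placement) []) (fun v => v) false]) placements) acc
      = fbpOrient ph pw bh bw acc := by
  unfold fbpOrient
  by_cases hg : ph - bh + 1 ≤ 0 ∨ pw - bw + 1 ≤ 0
  · simp only [hg, if_true]
    rcases hg with h | h
    · simp only [PySem.List.pyRange_one]
      simp
      intro n hn m
      omega
    · refine Eq.trans (PySem.List.foldl_congr_mem _ _ (fun pls _ => pls) _ (fun pls i _ => ?_)) (List.foldl_fixed _)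
      simp only [PySem.List.pyRange_one]
      simp
      intro m
      omega
  · simp only [hg, if_false]
    refine PySem.List.foldl_congr_mem _ _ _ _ (fun pls i _ => ?_)
    refine PySem.List.foldl_congr_mem _ _ _ _ (fun pls' j _ => ?_)
    rw [placement_eq_template pw bh bw i j, sorted_map_add]

-- ===== VERDICT (by name: the statement is the Claim_ definition above) =====
theorem find_block_placements_spec : Claim_equal_find_block_placements := by
  intro ph pw bh bw _
  show find_block_placements ph pw bh bw = find_block_placements_alt ph pw bh bw
  unfold find_block_placements find_block_placements_alt
  simp only [List.foldl_cons, List.foldl_nil]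
  rw [orient_eq ph pw bh bw [], orient_eq ph pw bw bh]
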